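-- pv_equiv track=rewrite | github.com/vjsingh1984/victor | victor/framework/patterns/miner.py | _get_order_pattern
-- ===== SOURCE A (Python) =====
-- def _get_order_pattern(execution_order: list[str]) -> str:
--     """Extract execution order pattern.
--
--     Args:
--         execution_order: List of node IDs in execution order
--
--     Returns:
--         Pattern string (e.g., "sequential", "parallel:2", etc.)
--     """
--     if not execution_order:
--         return "empty"
--
--     # Check for sequential pattern
--     if len(execution_order) == len(set(execution_order)):
--         # Each node appears once - simple sequential
--         return "sequential"
--
--     # Detect parallel groups
--     seen = set()
--     parallel_count = 0
--     for node in execution_order: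
--         if node in seen:
--             parallel_count += 1
--         seen.add(node)
--
--     if parallel_count > 0:
--         return f"parallel:{parallel_count}"
--
--     return "mixed"
-- ===== SOURCE B (Python) =====
-- def _get_order_pattern(execution_order: list[str]) -> str:
--     """Closed-form re-implementation: duplicate count = total - distinct."""
--     if not execution_order:
--         return "empty"
--     dup = len(execution_order) - len(set(execution_order))
--     return "sequential" if dup == 0 else f"parallel:{dup}"
-- ===== Notes on version B (the rewrite author's own statement) =====
-- stated objective: simpler
-- what changed: Replaces the explicit seen-set accumulating loop with the closed-form duplicate count len(xs) - len(set(xs)) and drops the unreachable 'mixed' branch.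
import Mathlib
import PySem

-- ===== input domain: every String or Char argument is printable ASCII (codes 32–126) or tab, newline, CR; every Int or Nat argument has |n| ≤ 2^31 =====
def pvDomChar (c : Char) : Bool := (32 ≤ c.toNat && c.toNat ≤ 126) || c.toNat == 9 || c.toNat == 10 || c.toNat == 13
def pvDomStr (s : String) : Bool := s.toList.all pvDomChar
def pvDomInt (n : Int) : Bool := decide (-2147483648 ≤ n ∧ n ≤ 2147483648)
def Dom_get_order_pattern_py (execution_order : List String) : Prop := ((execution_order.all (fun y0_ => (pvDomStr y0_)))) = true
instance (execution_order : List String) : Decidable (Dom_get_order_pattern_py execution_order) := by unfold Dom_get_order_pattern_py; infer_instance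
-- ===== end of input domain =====

-- B replaces A's explicit seen-set counting loop by the closed form len(xs) - len(set(xs)) (simpler; same cost).

-- ===== PORT A =====
-- literal transliteration of A: empty guard, uniqueness check via set, then the seen-set loop
def get_order_pattern_py (execution_order : List String) : String :=
  if execution_order = [] then "empty"
  else if execution_order.length = PySem.Set.len (PySem.Set.ofList execution_order) then "sequential"
  else
    let st := execution_order.foldl
      (fun (st : PySem.Set String × Int) node =>
        (PySem.Set.add st.1 node, if PySem.Set.contains st.1 node then st.2 + 1 else st.2))
      (PySem.Set.empty, 0)
    if st.2 > 0 then "parallel:" ++ PySem.Int.toStr st.2 else "mixed"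

-- ===== PORT B =====
-- literal transliteration of B: duplicate count in closed form
def get_order_pattern_py_alt (execution_order : List String) : String :=
  if execution_order = [] then "empty"
  else
    let dup : Int := (execution_order.length : Int) - (PySem.Set.len (PySem.Set.ofList execution_order) : Int)
    if dup = 0 then "sequential" else "parallel:" ++ PySem.Int.toStr dup

-- ===== PRECONDITION & SPEC =====
def Spec_get_order_pattern_py (execution_order : List String) (out : String) : Prop := out = get_order_pattern_py_alt execution_order
instance (execution_order : List String) (out : String) : Decidable (Spec_get_order_pattern_py execution_order out) := by unfold Spec_get_order_pattern_py; infer_instance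

-- ===== CLAIM (what is proved, stated in full; the proofs are below) =====
def Claim_equal_get_order_pattern_py : Prop := ∀ (execution_order : List String), Dom_get_order_pattern_py execution_order → Spec_get_order_pattern_py execution_order (get_order_pattern_py execution_order)

-- ===== LEMMAS AND PROOFS =====

-- the length of Set.add grows by one exactly when the element is new
lemma set_add_len (s : PySem.Set String) (x : String) :
    (PySem.Set.add s x).length = if PySem.Set.contains s x then s.length else s.length + 1 := by
  simp only [PySem.Set.add]
  split <;> simp

-- A's loop counts exactly the growth deficit of the seen set
lemma loop_count (xs : List String) : ∀ (seen : PySem.Set String) (cnt : Int),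
    (xs.foldl
      (fun (st : PySem.Set String × Int) node =>
        (PySem.Set.add st.1 node, if PySem.Set.contains st.1 node then st.2 + 1 else st.2))
      (seen, cnt)).2
      = cnt + (xs.length : Int) - (((PySem.Set.update seen xs).length : Int) - (seen.length : Int)) := by
  induction xs with
  | nil => intro seen cnt; simp [PySem.Set.update]
  | cons x rest ih =>
    intro seen cnt
    have hupd : PySem.Set.update seen (x :: rest) = PySem.Set.update (PySem.Set.add seen x) rest := by
      simp [PySem.Set.update]
    rw [List.foldl_cons, hupd]
    by_cases h : PySem.Set.contains seen x
    · have hlen : (PySem.Set.add seen x).length = seen.length := by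
        rw [set_add_len, if_pos h]
      rw [if_pos h, ih, hlen]
      simp only [List.length_cons]
      push_cast
      ring
    · have hlen : (PySem.Set.add seen x).length = seen.length + 1 := by
        rw [set_add_len, if_neg h]
      rw [if_neg h, ih, hlen]
      simp only [List.length_cons]
      push_cast
      ring

-- set(xs) has at most len(xs) elements
lemma ofList_len_le (xs : List String) : (PySem.Set.ofList xs).length ≤ xs.length := by
  have key : ∀ (ys : List String) (s : PySem.Set String),
      (PySem.Set.update s ys).length ≤ s.length + ys.length := by
    intro ys
    induction ys with
    | nil => intro s; simp [PySem.Set.update]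
    | cons y rest ih =>
      intro s
      have h1 : PySem.Set.update s (y :: rest) = PySem.Set.update (PySem.Set.add s y) rest := by
        simp [PySem.Set.update]
      have h2 : (PySem.Set.add s y).length ≤ s.length + 1 := by
        rw [set_add_len]; split <;> omega
      rw [h1]
      calc (PySem.Set.update (PySem.Set.add s y) rest).length
          ≤ (PySem.Set.add s y).length + rest.length := ih _
        _ ≤ s.length + (y :: rest).length := by simp; omega
  have := key xs PySem.Set.empty
  simpa [PySem.Set.ofList_eq_foldl, PySem.Set.update, PySem.Set.empty] using this

-- ===== VERDICT (by name: the statement is the Claim_ definition above) =====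
theorem get_order_pattern_py_spec : Claim_equal_get_order_pattern_py := by
  intro xs _
  unfold Spec_get_order_pattern_py get_order_pattern_py get_order_pattern_py_alt
  by_cases hnil : xs = []
  · simp [hnil]
  · simp only [hnil, if_false]
    have hlen_eq : PySem.Set.len (PySem.Set.ofList xs) = ((PySem.Set.ofList xs).length : Int) := rfl
    by_cases heq : (xs.length : Int) = PySem.Set.len (PySem.Set.ofList xs)
    · have hz : ((xs.length : Int) - (PySem.Set.len (PySem.Set.ofList xs) : Int)) = 0 := by
        rw [heq]; ring
      rw [if_pos heq, if_pos hz]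
    · have hle := ofList_len_le xs
      rw [hlen_eq] at heq
      have hdup_pos : (0 : Int) < (xs.length : Int) - ((PySem.Set.ofList xs).length : Int) := by
        omega
      have hcnt := loop_count xs PySem.Set.empty 0
      have hof : PySem.Set.update PySem.Set.empty xs = PySem.Set.ofList xs := by
        simp [PySem.Set.ofList_eq_foldl, PySem.Set.update, PySem.Set.empty]
      rw [hof] at hcnt
      have hcnt' :
          (xs.foldl
            (fun (st : PySem.Set String × Int) node =>
              (PySem.Set.add st.1 node, if PySem.Set.contains st.1 node then st.2 + 1 else st.2))
            (PySem.Set.empty, 0)).2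
            = (xs.length : Int) - ((PySem.Set.ofList xs).length : Int) := by
        rw [hcnt]; simp [PySem.Set.empty]
      have hne : ¬ ((xs.length : Int) - ((PySem.Set.ofList xs).length : Int) = 0) := by omega
      rw [hlen_eq]
      rw [if_neg heq, if_neg hne]
      rw [hcnt', if_pos hdup_pos]
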